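-- pv_equiv track=rewrite | github.com/theguyoverthere/CMU15-112-Spring17 | src/Week2/Homework/hw2.py | findRightKaprekar
-- ===== SOURCE A (Python) =====
-- def sumPartition(n, partitionSize):
--     lPart = 0
--     rPart = 0
--     m = n
--
--     for i in range(partitionSize):
--         nthDigit = m % 10
--         rPart += nthDigit * (10 ** i)
--         m //= 10
--
--     if rPart == 0: return -1
--     lPart = (n - rPart) // (10 ** partitionSize)
--     return lPart + rPart
--
-- def isKaprekarNumber(n):
--     square    = n ** 2
--     numDigits = digitCount(square)
--
--     for i in range(numDigits):
--         if sumPartition(square, i + 1) == n: return True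
--
--     return False
--
-- def findRightKaprekar(lowerBound, upperBound):
--     guess = lowerBound
--
--     if upperBound == 0:
--         while True:
--             guess += 1
--             if isKaprekarNumber(guess): break
--     else:
--         while guess < upperBound:
--             guess += 1
--             if isKaprekarNumber(guess): break
--
--     return guess, (guess - lowerBound)
--
-- def digitCount(n):
--     if n == 0: return 1
--     count = 0
--     n = abs(n)
--
--     while n > 0:
--         count += 1
--         n //= 10
--     return count
-- ===== SOURCE B (Python) =====
-- def findRightKaprekar(lowerBound, upperBound):
--     guess = lowerBound
--
--     if upperBound == 0:
--         while True:
--             guess += 1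
--             if _isKaprekar(guess): break
--     else:
--         while guess < upperBound:
--             guess += 1
--             if _isKaprekar(guess): break
--
--     return guess, (guess - lowerBound)
--
-- def _isKaprekar(n):
--     # one divmod per split point of n*n, no digit counting and no per-digit loop
--     sq = n * n
--     pw = 10
--     while pw <= 10 * sq:
--         q, r = divmod(sq, pw)
--         if r and q + r == n:
--             return True
--         pw *= 10
--     return False
-- ===== Notes on version B (the rewrite author's own statement) =====
-- stated objective: simpler
-- what changed: A's three-helper Kaprekar test (digitCount, then for each partition size a per-digit loop rebuilding the right part) is replaced by a single loop over powers of ten that does one divmod of the square per split point; the search loop is unchanged.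
import Mathlib
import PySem

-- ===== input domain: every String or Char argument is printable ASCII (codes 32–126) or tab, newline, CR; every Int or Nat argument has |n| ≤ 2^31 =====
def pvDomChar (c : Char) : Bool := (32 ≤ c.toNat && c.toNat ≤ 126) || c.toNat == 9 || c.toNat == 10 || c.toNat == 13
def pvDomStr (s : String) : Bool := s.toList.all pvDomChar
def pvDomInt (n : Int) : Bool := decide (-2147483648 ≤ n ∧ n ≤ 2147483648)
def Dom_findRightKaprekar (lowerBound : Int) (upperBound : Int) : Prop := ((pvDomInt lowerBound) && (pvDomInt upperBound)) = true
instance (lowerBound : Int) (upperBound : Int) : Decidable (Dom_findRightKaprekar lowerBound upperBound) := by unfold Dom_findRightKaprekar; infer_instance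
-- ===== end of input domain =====

-- B replaces A's three-helper Kaprekar test (digitCount + per-digit sumPartition loop) by a single
-- loop over powers of ten doing one divmod per split point; same search loop, same results (objective: simpler).


-- ===== PORT A =====
-- while n > 0: count += 1; n //= 10   (fuel n.natAbs + 1 always suffices: n shrinks via //10)
def digitCountLoop : Nat → Int → Int → Int
  | 0, _, count => count
  | fuel+1, n, count =>
      if n > 0 then digitCountLoop fuel (PySem.Int.floordiv n 10) (count + 1) else count

def digitCount (n : Int) : Int :=
  if n = 0 then 1 else digitCountLoop (n.natAbs + 1) (Int.natAbs n : Int) 0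

def sumPartition (n : Int) (partitionSize : Int) : Int :=
  -- for i in range(partitionSize): rPart += (m % 10) * 10 ** i; m //= 10   (state (rPart, m))
  -- 10 ** i / 10 ** partitionSize: both exponents are nonnegative at every call, so .toNat is exact
  let st := (PySem.List.pyRange 0 partitionSize 1).foldl
    (fun (st : Int × Int) i =>
      (st.1 + PySem.Int.mod st.2 10 * 10 ^ i.toNat, PySem.Int.floordiv st.2 10))
    ((0 : Int), n)
  if st.1 = 0 then -1
  else PySem.Int.floordiv (n - st.1) (10 ^ partitionSize.toNat) + st.1

def isKaprekarNumber (n : Int) : Bool :=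
  let square := n ^ 2
  let numDigits := digitCount square
  (PySem.List.pyRange 0 numDigits 1).any (fun i => sumPartition square (i + 1) == n)

-- 'while True: guess += 1; if isKaprekarNumber(guess): break', made total with fuel
def searchLoopA : Nat → Int → Int
  | 0, guess => guess
  | fuel+1, guess =>
      let g := guess + 1
      if isKaprekarNumber g then g else searchLoopA fuel g

-- 'while guess < upperBound: guess += 1; if isKaprekarNumber(guess): break' (fuel (ub-lb).toNat is exact)
def boundedLoopA : Nat → Int → Int → Int
  | 0, guess, _ => guess
  | fuel+1, guess, upperBound =>
      if guess < upperBound then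
        let g := guess + 1
        if isKaprekarNumber g then g else boundedLoopA fuel g upperBound
      else guess

def findRightKaprekar (lowerBound : Int) (upperBound : Int) : Int × Int :=
  let guess :=
    if upperBound = 0 then searchLoopA 10000000000 lowerBound
    else boundedLoopA (upperBound - lowerBound).toNat lowerBound upperBound
  (guess, guess - lowerBound)

-- ===== PORT B =====
-- while pw <= 10 * sq: q, r = divmod(sq, pw); if r and q + r == n: return True; pw *= 10
def kapLoop : Nat → Int → Int → Int → Bool
  | 0, _, _, _ => false
  | fuel+1, n, sq, pw =>
      if pw ≤ 10 * sq then
        let q := PySem.Int.floordiv sq pw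
        let r := PySem.Int.mod sq pw
        if r ≠ 0 ∧ q + r = n then true else kapLoop fuel n sq (pw * 10)
      else false

def isKaprekarB (n : Int) : Bool :=
  let sq := n * n
  kapLoop (sq.toNat + 1) n sq 10

def searchLoopB : Nat → Int → Int
  | 0, guess => guess
  | fuel+1, guess =>
      let g := guess + 1
      if isKaprekarB g then g else searchLoopB fuel g

def boundedLoopB : Nat → Int → Int → Int
  | 0, guess, _ => guess
  | fuel+1, guess, upperBound =>
      if guess < upperBound then
        let g := guess + 1
        if isKaprekarB g then g else boundedLoopB fuel g upperBound
      else guess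

def findRightKaprekar_alt (lowerBound : Int) (upperBound : Int) : Int × Int :=
  let guess :=
    if upperBound = 0 then searchLoopB 10000000000 lowerBound
    else boundedLoopB (upperBound - lowerBound).toNat lowerBound upperBound
  (guess, guess - lowerBound)

-- ===== PRECONDITION & SPEC =====
def Spec_findRightKaprekar (lowerBound : Int) (upperBound : Int) (out : Int × Int) : Prop := out = findRightKaprekar_alt lowerBound upperBound
instance (lowerBound : Int) (upperBound : Int) (out : Int × Int) : Decidable (Spec_findRightKaprekar lowerBound upperBound out) := by unfold Spec_findRightKaprekar; infer_instance

-- ===== CLAIM (what is proved, stated in full; the proofs are below) =====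
def Claim_equal_findRightKaprekar : Prop := ∀ (lowerBound : Int) (upperBound : Int), Dom_findRightKaprekar lowerBound upperBound → Spec_findRightKaprekar lowerBound upperBound (findRightKaprekar lowerBound upperBound)

-- ===== LEMMAS AND PROOFS =====

-- the common split-point condition both Kaprekar tests decide
def KapCond (M : Nat) (n : Int) (k : Nat) : Prop :=
  M % 10 ^ k ≠ 0 ∧ ((M / 10 ^ k : Nat) : Int) + ((M % 10 ^ k : Nat) : Int) = n

lemma digitCountLoop_zero (fuel : Nat) (c : Int) : digitCountLoop fuel 0 c = c := by
  cases fuel <;> simp [digitCountLoop]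

lemma digitCountLoop_spec : ∀ (fuel M : Nat) (c : Int), 0 < M → M < 10 ^ fuel →
    digitCountLoop fuel (M : Int) c = c + ((Nat.log 10 M + 1 : Nat) : Int) := by
  intro fuel
  induction fuel with
  | zero => intro M c h1 h2; omega
  | succ f ih =>
      intro M c h1 h2
      have hpos : (0:Int) < (M:Int) := by exact_mod_cast h1
      have hdiv : PySem.Int.floordiv (M:Int) 10 = ((M / 10 : Nat) : Int) := by
        rw [PySem.Int.floordiv_eq_ediv_of_pos (by norm_num)]
        exact_mod_cast (Int.natCast_div M 10).symm
      simp only [digitCountLoop, hpos, if_pos, hdiv]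
      by_cases h10 : M < 10
      · have : M / 10 = 0 := Nat.div_eq_of_lt h10
        rw [this]
        push_cast
        rw [digitCountLoop_zero]
        have : Nat.log 10 M = 0 := Nat.log_eq_zero_iff.mpr (Or.inl h10)
        rw [this]; push_cast; ring
      · have hge : 10 ≤ M := le_of_not_gt h10
        have hpos' : 0 < M / 10 := Nat.div_pos hge (by norm_num)
        have hlt' : M / 10 < 10 ^ f := by
          rw [Nat.div_lt_iff_lt_mul (by norm_num)]
          calc M < 10 ^ (f+1) := h2
            _ = 10 ^ f * 10 := by ring
        rw [ih (M/10) (c+1) hpos' hlt']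
        have hlog : Nat.log 10 (M / 10) = Nat.log 10 M - 1 := Nat.log_div_base 10 M
        have hlp : 0 < Nat.log 10 M := Nat.log_pos (by norm_num) hge
        rw [hlog]
        push_cast [Nat.sub_add_cancel hlp]
        omega

lemma digitCount_spec (M : Nat) (h : 0 < M) :
    digitCount (M : Int) = ((Nat.log 10 M + 1 : Nat) : Int) := by
  unfold digitCount
  rw [if_neg (by exact_mod_cast h.ne'), Int.natAbs_natCast]
  have : M < 10 ^ (M + 1) := lt_of_lt_of_le (Nat.lt_pow_self (by norm_num)) (Nat.pow_le_pow_right (by norm_num) (Nat.le_succ M))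
  rw [digitCountLoop_spec (M+1) M 0 h this]; ring

lemma part_fold (M : Nat) : ∀ (k : Nat),
    (List.range k).foldl (fun (st : Int × Int) (i : Nat) =>
      (st.1 + PySem.Int.mod st.2 10 * 10 ^ i, PySem.Int.floordiv st.2 10)) ((0 : Int), (M : Int))
    = (((M % 10 ^ k : Nat) : Int), ((M / 10 ^ k : Nat) : Int)) := by
  intro k
  induction k with
  | zero => simp
  | succ k ih =>
      rw [List.range_succ, List.foldl_append, ih]
      simp only [List.foldl_cons, List.foldl_nil]
      have hmod : PySem.Int.mod ((M / 10 ^ k : Nat) : Int) 10 = ((M / 10 ^ k % 10 : Nat) : Int) := by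
        rw [PySem.Int.mod_eq_emod_of_pos (by norm_num)]
        exact_mod_cast (Int.natCast_mod (M / 10^k) 10).symm
      have hdiv : PySem.Int.floordiv ((M / 10 ^ k : Nat) : Int) 10 = ((M / 10 ^ (k+1) : Nat) : Int) := by
        rw [PySem.Int.floordiv_eq_ediv_of_pos (by norm_num)]
        have : M / 10 ^ k / 10 = M / 10 ^ (k+1) := by rw [Nat.div_div_eq_div_mul, ← pow_succ]
        exact_mod_cast congrArg (Nat.cast : Nat → Int) this
      rw [hmod, hdiv]
      have hN : M % 10 ^ (k+1) = M % 10 ^ k + 10 ^ k * (M / 10 ^ k % 10) := by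
        conv_lhs => rw [pow_succ, Nat.mod_mul]
      rw [hN]
      push_cast
      rw [Prod.mk.injEq]
      exact ⟨by ring, rfl⟩

lemma sumPartition_char (M k : Nat) :
    sumPartition (M : Int) ((k : Nat) : Int) =
      if M % 10 ^ k = 0 then -1
      else ((M / 10 ^ k : Nat) : Int) + ((M % 10 ^ k : Nat) : Int) := by
  unfold sumPartition
  rw [PySem.List.pyRange_zero_natCast, List.foldl_map]
  simp only [Int.toNat_natCast]
  rw [part_fold M k]
  dsimp only
  by_cases hz : M % 10 ^ k = 0
  · rw [if_pos (by exact_mod_cast hz), if_pos hz]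
  · rw [if_neg (by exact_mod_cast hz), if_neg hz]
    have hle : M % 10 ^ k ≤ M := Nat.mod_le _ _
    have hsub : (M : Int) - ((M % 10 ^ k : Nat) : Int) = ((M - M % 10 ^ k : Nat) : Int) := by
      push_cast [hle]; ring
    rw [hsub]
    have hq : M - M % 10 ^ k = 10 ^ k * (M / 10 ^ k) := by
      have := Nat.div_add_mod M (10 ^ k); omega
    have hdiv : PySem.Int.floordiv ((M - M % 10 ^ k : Nat) : Int) (10 ^ k) = ((M / 10 ^ k : Nat) : Int) := by
      rw [PySem.Int.floordiv_eq_ediv_of_pos (by positivity), hq]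
      have : (10 ^ k * (M / 10 ^ k)) / 10 ^ k = M / 10 ^ k := Nat.mul_div_cancel_left _ (by positivity)
      calc ((10 ^ k * (M / 10 ^ k) : Nat) : Int) / (10:Int) ^ k
          = ((10 ^ k * (M / 10 ^ k) : Nat) : Int) / (((10 ^ k : Nat)) : Int) := by push_cast; ring_nf
        _ = (((10 ^ k * (M / 10 ^ k)) / 10 ^ k : Nat) : Int) := (Int.natCast_div _ _).symm
        _ = ((M / 10 ^ k : Nat) : Int) := by rw [this]
    rw [hdiv]

lemma isKapA_iff (n : Int) (hn : n ≠ -1) (M : Nat) (hM : n ^ 2 = (M : Int)) :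
    isKaprekarNumber n = true ↔ ∃ k : Nat, 1 ≤ k ∧ (k : Int) ≤ digitCount (M : Int) ∧ KapCond M n k := by
  unfold isKaprekarNumber
  rw [hM]
  simp only [List.any_eq_true, PySem.List.mem_pyRange_one, beq_iff_eq]
  constructor
  · rintro ⟨i, ⟨hi0, hid⟩, heq⟩
    obtain ⟨j, rfl⟩ : ∃ j : Nat, i = (j : Int) := ⟨i.toNat, (Int.toNat_of_nonneg hi0).symm⟩
    have hj1 : ((j : Int) + 1) = ((j + 1 : Nat) : Int) := by push_cast; ring
    rw [hj1, sumPartition_char M (j+1)] at heq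
    by_cases hz : M % 10 ^ (j+1) = 0
    · rw [if_pos hz] at heq; exact absurd heq.symm hn
    · rw [if_neg hz] at heq
      exact ⟨j+1, by omega, by exact_mod_cast by omega, ⟨hz, heq⟩⟩
  · rintro ⟨k, hk1, hkd, hz, heq⟩
    refine ⟨((k - 1 : Nat) : Int), ⟨by positivity, ?_⟩, ?_⟩
    · have hlt : ((k - 1 : Nat) : Int) < (k : Int) := by exact_mod_cast (by omega : k - 1 < k)
      omega
    · have hcast : ((k - 1 : Nat) : Int) + 1 = ((k : Nat) : Int) := by
        have h' : k - 1 + 1 = k := by omega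
        calc ((k - 1 : Nat) : Int) + 1 = ((k - 1 + 1 : Nat) : Int) := by push_cast; ring
          _ = ((k : Nat) : Int) := by rw [h']
      rw [hcast, sumPartition_char M k, if_neg hz]
      exact heq

lemma kapLoop_iff : ∀ (c : Nat) (n : Int) (M j : Nat),
    kapLoop c n (M : Int) ((10 : Int) ^ (j + 1)) = true ↔
      ∃ t, t < c ∧ 10 ^ (j + 1 + t) ≤ 10 * M ∧ KapCond M n (j + 1 + t) := by
  intro c
  induction c with
  | zero => intro n M j; simp [kapLoop]
  | succ f ih =>
      intro n M j
      have hcast : ((10:Int) ^ (j+1) ≤ 10 * (M:Int)) ↔ (10 ^ (j+1) ≤ 10 * M) := by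
        constructor <;> intro h <;> exact_mod_cast h
      by_cases hc : 10 ^ (j+1) ≤ 10 * M
      · have hq : PySem.Int.floordiv (M:Int) ((10:Int) ^ (j+1)) = ((M / 10 ^ (j+1) : Nat) : Int) := by
          rw [PySem.Int.floordiv_eq_ediv_of_pos (by positivity)]
          calc (M:Int) / (10:Int) ^ (j+1) = (M:Int) / ((10 ^ (j+1) : Nat) : Int) := by push_cast; ring_nf
            _ = ((M / 10 ^ (j+1) : Nat) : Int) := (Int.natCast_div _ _).symm
        have hr : PySem.Int.mod (M:Int) ((10:Int) ^ (j+1)) = ((M % 10 ^ (j+1) : Nat) : Int) := by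
          rw [PySem.Int.mod_eq_emod_of_pos (by positivity)]
          calc (M:Int) % (10:Int) ^ (j+1) = (M:Int) % ((10 ^ (j+1) : Nat) : Int) := by push_cast; ring_nf
            _ = ((M % 10 ^ (j+1) : Nat) : Int) := (Int.natCast_mod _ _).symm
        simp only [kapLoop, hq, hr, if_pos (hcast.mpr hc)]
        by_cases hP : KapCond M n (j+1)
        · have : (((M % 10 ^ (j+1) : Nat) : Int) ≠ 0 ∧ ((M / 10 ^ (j+1) : Nat) : Int) + ((M % 10 ^ (j+1) : Nat) : Int) = n) := by
            refine ⟨by exact_mod_cast hP.1, hP.2⟩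
          rw [if_pos this]
          simp only [true_iff]
          exact ⟨0, by omega, by simpa using hc, by simpa using hP⟩
        · have hnP : ¬(((M % 10 ^ (j+1) : Nat) : Int) ≠ 0 ∧ ((M / 10 ^ (j+1) : Nat) : Int) + ((M % 10 ^ (j+1) : Nat) : Int) = n) := by
            intro h; exact hP ⟨by exact_mod_cast h.1, h.2⟩
          rw [if_neg hnP]
          have hpw : (10:Int) ^ (j+1) * 10 = (10:Int) ^ (j+2) := by ring
          rw [hpw, ih n M (j+1)]
          constructor
          · rintro ⟨t, ht, hle, hPt⟩
            exact ⟨t+1, by omega, by rw [show j+1+(t+1) = j+1+1+t from by omega]; exact hle, by rw [show j+1+(t+1) = j+1+1+t from by omega]; exact hPt⟩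
          · rintro ⟨t, ht, hle, hPt⟩
            match t, hPt with
            | 0, hPt => exact absurd (by simpa using hPt) hP
            | t+1, hPt => exact ⟨t, by omega, by rw [show j+1+1+t = j+1+(t+1) from by omega]; exact hle, by rw [show j+1+1+t = j+1+(t+1) from by omega]; exact hPt⟩
      · simp only [kapLoop, if_neg (fun h => hc (hcast.mp h))]
        constructor
        · intro h; exact absurd h (by simp)
        · rintro ⟨t, ht, hle, _⟩
          exact absurd (le_trans (Nat.pow_le_pow_right (by norm_num) (by omega)) hle) hc

lemma isKapB_iff (n : Int) (M : Nat) (hM : n * n = (M : Int)) :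
    isKaprekarB n = true ↔ ∃ t, t < M + 1 ∧ 10 ^ (1 + t) ≤ 10 * M ∧ KapCond M n (1 + t) := by
  unfold isKaprekarB
  dsimp only
  rw [hM, Int.toNat_natCast, show (10 : Int) = (10 : Int) ^ (0 + 1) from by ring]
  simpa using kapLoop_iff (M + 1) n M 0

lemma isKap_agree (n : Int) : isKaprekarNumber n = isKaprekarB n := by
  by_cases hn : n = -1
  · subst hn; decide
  · have hnn : 0 ≤ n * n := mul_self_nonneg n
    set M : Nat := (n * n).toNat with hMdef
    have hM : n * n = (M : Int) := (Int.toNat_of_nonneg hnn).symm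
    have hM2 : n ^ 2 = (M : Int) := by rw [pow_two]; exact hM
    rw [Bool.eq_iff_iff, isKapA_iff n hn M hM2, isKapB_iff n M hM]
    constructor
    · rintro ⟨k, hk1, hkd, hP⟩
      have hMne : M ≠ 0 := by
        intro h; rw [h] at hP; exact hP.1 (Nat.zero_mod _)
      rw [digitCount_spec M (Nat.pos_of_ne_zero hMne)] at hkd
      have hklog : k ≤ Nat.log 10 M + 1 := by exact_mod_cast hkd
      have hlogM : Nat.log 10 M ≤ M := Nat.log_le_self 10 M
      refine ⟨k - 1, by omega, ?_, ?_⟩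
      · have h1 : 10 ^ (k - 1) ≤ 10 ^ Nat.log 10 M := Nat.pow_le_pow_right (by norm_num) (by omega)
        have h2 : 10 ^ Nat.log 10 M ≤ M := Nat.pow_log_le_self 10 hMne
        calc 10 ^ (1 + (k - 1)) = 10 * 10 ^ (k - 1) := by rw [pow_add, pow_one]
          _ ≤ 10 * M := by omega
      · rw [show 1 + (k - 1) = k from by omega]; exact hP
    · rintro ⟨t, ht, hle, hP⟩
      have hMne : M ≠ 0 := by
        intro h; rw [h] at hP; exact hP.1 (Nat.zero_mod _)
      have h10 : 10 * 10 ^ t ≤ 10 * M := by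
        calc 10 * 10 ^ t = 10 ^ (1 + t) := by rw [pow_add, pow_one]
          _ ≤ 10 * M := hle
      have hpow : 10 ^ t ≤ M := Nat.le_of_mul_le_mul_left h10 (by norm_num)
      have htlog : t ≤ Nat.log 10 M := (Nat.le_log_iff_pow_le (by norm_num) hMne).mpr hpow
      refine ⟨1 + t, by omega, ?_, hP⟩
      rw [digitCount_spec M (Nat.pos_of_ne_zero hMne)]
      exact_mod_cast by omega

lemma searchLoop_agree : ∀ (fuel : Nat) (g : Int), searchLoopA fuel g = searchLoopB fuel g := by
  intro fuel
  induction fuel with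
  | zero => intro g; rfl
  | succ f ih => intro g; simp only [searchLoopA, searchLoopB, isKap_agree]; split <;> [rfl; exact ih _]

lemma boundedLoop_agree : ∀ (fuel : Nat) (g ub : Int), boundedLoopA fuel g ub = boundedLoopB fuel g ub := by
  intro fuel
  induction fuel with
  | zero => intro g ub; rfl
  | succ f ih =>
      intro g ub
      simp only [boundedLoopA, boundedLoopB, isKap_agree]
      split <;> [skip; rfl]
      split <;> [rfl; exact ih _ _]

-- ===== VERDICT (by name: the statement is the Claim_ definition above) =====
theorem findRightKaprekar_spec : Claim_equal_findRightKaprekar := by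
  intro lb ub _
  unfold Spec_findRightKaprekar findRightKaprekar findRightKaprekar_alt
  rw [searchLoop_agree, boundedLoop_agree]
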